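-- pv_equiv track=rewrite | github.com/EpsilonLabsInc/InternVL-Epsi | gpt_separate_reports.py | separate_text_rules
-- ===== SOURCE A (Python) =====
-- def separate_text_rules(text):
--     # Convert the text to lowercase
--     text = text.lower()
--
--     # Split the text into lines
--     lines = text.split("\n")
--
--     # Initialize variables
--     part1 = []
--     part2 = []
--     found_separator = False
--
--     # Loop through the lines and separate the text
--     for line in lines:
--         if not line or line.isspace() or line == "\n":
--             continue
--
--         if "findings" in line or "impression" in line:
--             found_separator = True
--
--         if "reason for examination" in line:
--             part1.append(line)
--             found_separator = True
--         else:
--             if found_separator: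
--                 part2.append(line)
--             else:
--                 part1.append(line)
--
--     # Join the parts back into strings
--     part1 = "\n".join(part1).strip()
--     part2 = "\n".join(part2).strip()
--
--     return {"gpt_clinic_note": part1, "gpt_impressions_and_findings": part2}
-- ===== SOURCE B (Python) =====
-- def separate_text_rules(text):
--     lines = [ln for ln in text.lower().split("\n") if ln and not ln.isspace()]
--     kws = ("findings", "impression", "reason for examination")
--     i0 = next((i for i, ln in enumerate(lines) if any(k in ln for k in kws)), len(lines))
--     part1 = lines[:i0] + [ln for ln in lines[i0:] if "reason for examination" in ln]
--     part2 = [ln for ln in lines[i0:] if "reason for examination" not in ln]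
--     return {"gpt_clinic_note": "\n".join(part1).strip(),
--             "gpt_impressions_and_findings": "\n".join(part2).strip()}
-- ===== Notes on version B (the rewrite author's own statement) =====
-- stated objective: alternative
-- what changed: Replaces the stateful found_separator flag loop with an index-based decomposition: compute the first trigger-line index i0 once, then build each part with slices and filters over the cleaned line list.
import Mathlib
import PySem

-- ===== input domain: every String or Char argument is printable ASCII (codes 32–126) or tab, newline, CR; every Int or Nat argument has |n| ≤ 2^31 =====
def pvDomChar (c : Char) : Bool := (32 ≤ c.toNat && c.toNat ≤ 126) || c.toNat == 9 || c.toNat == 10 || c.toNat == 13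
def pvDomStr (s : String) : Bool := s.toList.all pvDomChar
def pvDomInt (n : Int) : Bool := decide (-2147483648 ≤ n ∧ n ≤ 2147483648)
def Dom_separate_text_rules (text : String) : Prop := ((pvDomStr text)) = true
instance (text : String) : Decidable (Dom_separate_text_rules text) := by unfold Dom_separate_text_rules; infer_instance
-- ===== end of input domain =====

-- B replaces A's stateful found_separator flag loop with an index-based decomposition:
-- first trigger-line index i0, then slices/filters of the cleaned line list (objective: alternative).

-- ===== PORT A =====
-- one loop step of A, on state (part1, part2, found_separator)
def sepAStep (st : List String × List String × Bool) (line : String) :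
    List String × List String × Bool :=
  if (line == "" || PySem.Str.strIsspace line) || line == "\n" then st
  else
    let f1 := if PySem.Str.isIn "findings" line || PySem.Str.isIn "impression" line
              then true else st.2.2
    if PySem.Str.isIn "reason for examination" line then
      (st.1 ++ [line], st.2.1, true)
    else
      if f1 then (st.1, st.2.1 ++ [line], f1) else (st.1 ++ [line], st.2.1, f1)

def separate_text_rules (text : String) : List (String × String) :=
  let t := PySem.Str.lower text
  let lines := (PySem.Str.split? t "\n").getD []   -- sep "\n" ≠ "", so split? is always `some`
  let st := lines.foldl sepAStep ([], [], false)
  [("gpt_clinic_note", PySem.Str.strip (PySem.Str.join "\n" st.1)),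
   ("gpt_impressions_and_findings", PySem.Str.strip (PySem.Str.join "\n" st.2.1))]

-- ===== PORT B =====
def keepLine (line : String) : Bool := !(line == "" || PySem.Str.strIsspace line)

def isTrigger (line : String) : Bool :=
  PySem.Str.isIn "findings" line || PySem.Str.isIn "impression" line ||
    PySem.Str.isIn "reason for examination" line

def hasReason (line : String) : Bool := PySem.Str.isIn "reason for examination" line

def separate_text_rules_alt (text : String) : List (String × String) :=
  let lines := ((PySem.Str.split? (PySem.Str.lower text) "\n").getD []).filter keepLine
  let i0 := lines.findIdx isTrigger
  let part1 := lines.take i0 ++ (lines.drop i0).filter hasReason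
  let part2 := (lines.drop i0).filter (fun l => !hasReason l)
  [("gpt_clinic_note", PySem.Str.strip (PySem.Str.join "\n" part1)),
   ("gpt_impressions_and_findings", PySem.Str.strip (PySem.Str.join "\n" part2))]

-- ===== PRECONDITION & SPEC =====
def Spec_separate_text_rules (text : String) (out : List (String × String)) : Prop := out = separate_text_rules_alt text
instance (text : String) (out : List (String × String)) : Decidable (Spec_separate_text_rules text out) := by unfold Spec_separate_text_rules; infer_instance

-- ===== CLAIM (what is proved, stated in full; the proofs are below) =====
def Claim_equal_separate_text_rules : Prop := ∀ (text : String), Dom_separate_text_rules text → Spec_separate_text_rules text (separate_text_rules text)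

-- ===== LEMMAS AND PROOFS =====

lemma sepAStep_skip (st : List String × List String × Bool) (line : String)
    (h : keepLine line = false) : sepAStep st line = st := by
  simp only [keepLine, Bool.not_eq_false', Bool.or_eq_true] at h
  by_cases he : line = ""
  · simp [sepAStep, he]
  · rcases h with h | h
    · exact absurd (by simpa using h) he
    · have h' : PySem.Chars.strIsspace line.toList = true := by simpa using h
      simp [sepAStep, h']

lemma keep_facts (line : String) (h : keepLine line = true) :
    ¬ line = "" ∧ PySem.Chars.strIsspace line.toList = false ∧ ¬ line = "\n" := by
  simp [keepLine] at h
  refine ⟨h.1, h.2, ?_⟩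
  intro he; subst he
  exact absurd h.2 (by decide)

lemma sepAStep_reason (st : List String × List String × Bool) (line : String)
    (h : keepLine line = true) (hr : hasReason line = true) :
    sepAStep st line = (st.1 ++ [line], st.2.1, true) := by
  obtain ⟨h1, h2, h3⟩ := keep_facts line h
  have hr' := hr
  simp [hasReason] at hr'
  simp [sepAStep, h1, h2, h3, hr']

lemma sepAStep_fi (st : List String × List String × Bool) (line : String)
    (h : keepLine line = true) (hr : hasReason line = false)
    (hfi : (PySem.Str.isIn "findings" line || PySem.Str.isIn "impression" line) = true) :
    sepAStep st line = (st.1, st.2.1 ++ [line], true) := by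
  obtain ⟨h1, h2, h3⟩ := keep_facts line h
  have hr' := hr
  simp [hasReason] at hr'
  simp only [Bool.or_eq_true] at hfi
  simp at hfi
  simp [sepAStep, h1, h2, h3, hr', hfi]

lemma sepAStep_plain (st : List String × List String × Bool) (line : String)
    (h : keepLine line = true) (htr : isTrigger line = false) :
    sepAStep st line =
      (if st.2.2 then (st.1, st.2.1 ++ [line], st.2.2) else (st.1 ++ [line], st.2.1, st.2.2)) := by
  obtain ⟨h1, h2, h3⟩ := keep_facts line h
  simp only [isTrigger, Bool.or_eq_false_iff] at htr
  obtain ⟨⟨ha, hb⟩, hc⟩ := htr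
  simp at ha hb hc
  simp [sepAStep, h1, h2, h3, ha, hb, hc]

-- A's fold over the FULL line list equals its fold over the kept lines
lemma foldA_filter (ls : List String) (st : List String × List String × Bool) :
    ls.foldl sepAStep st = (ls.filter keepLine).foldl sepAStep st := by
  induction ls generalizing st with
  | nil => rfl
  | cons l t ih =>
    by_cases h : keepLine l = true
    · simp [h, ih]
    · simp only [Bool.not_eq_true] at h
      simp [h, sepAStep_skip _ _ h, ih]

-- after the separator has been found, reason-lines go to part1 and the rest to part2
lemma foldA_true (ls : List String) (h : ∀ l ∈ ls, keepLine l = true) :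
    ∀ p1 p2, ls.foldl sepAStep (p1, p2, true) =
      (p1 ++ ls.filter hasReason, p2 ++ ls.filter (fun l => !hasReason l), true) := by
  induction ls with
  | nil => simp
  | cons l t ih =>
    intro p1 p2
    have hk := h l (by simp)
    have ht : ∀ x ∈ t, keepLine x = true := fun x hx => h x (by simp [hx])
    by_cases hr : hasReason l = true
    · rw [List.foldl_cons, sepAStep_reason _ _ hk hr]
      simp [hr, ih ht]
    · simp only [Bool.not_eq_true] at hr
      have hstep : sepAStep (p1, p2, true) l = (p1, p2 ++ [l], true) := by
        by_cases hfi : (PySem.Str.isIn "findings" l || PySem.Str.isIn "impression" l) = true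
        · exact sepAStep_fi _ _ hk hr hfi
        · simp only [Bool.not_eq_true] at hfi
          have htr : isTrigger l = false := by
            simp only [isTrigger, Bool.or_eq_false_iff]
            exact ⟨Bool.or_eq_false_iff.mp hfi, hr⟩
          rw [sepAStep_plain _ _ hk htr]; simp
      rw [List.foldl_cons, hstep]
      simp [hr, ih ht]

-- before the separator, the fold realises B's take/drop decomposition at i0 = findIdx isTrigger
lemma foldA_false (ls : List String) (h : ∀ l ∈ ls, keepLine l = true) :
    ∀ p1 p2, ls.foldl sepAStep (p1, p2, false) =
      (p1 ++ ls.take (ls.findIdx isTrigger)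
          ++ (ls.drop (ls.findIdx isTrigger)).filter hasReason,
       p2 ++ (ls.drop (ls.findIdx isTrigger)).filter (fun l => !hasReason l),
       decide (ls.findIdx isTrigger < ls.length)) := by
  induction ls with
  | nil => simp
  | cons l t ih =>
    intro p1 p2
    have hk := h l (by simp)
    have ht : ∀ x ∈ t, keepLine x = true := fun x hx => h x (by simp [hx])
    by_cases htr : isTrigger l = true
    · have hidx : (l :: t).findIdx isTrigger = 0 := by simp [List.findIdx_cons, htr]
      by_cases hr : hasReason l = true
      · rw [List.foldl_cons, sepAStep_reason _ _ hk hr, foldA_true t ht]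
        simp [hidx, hr]
      · simp only [Bool.not_eq_true] at hr
        have hfi : (PySem.Str.isIn "findings" l || PySem.Str.isIn "impression" l) = true := by
          rcases Bool.or_eq_true_iff.mp htr with h' | h'
          · exact h'
          · simp only [hasReason] at hr; rw [h'] at hr; exact absurd hr (by simp)
        rw [List.foldl_cons, sepAStep_fi _ _ hk hr hfi, foldA_true t ht]
        simp [hidx, hr]
    · simp only [Bool.not_eq_true] at htr
      have hidx : (l :: t).findIdx isTrigger = t.findIdx isTrigger + 1 := by
        simp [List.findIdx_cons, htr]
      rw [List.foldl_cons, sepAStep_plain _ _ hk htr]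
      rw [if_neg (by simp : ¬ ((p1, p2, false) : List String × List String × Bool).2.2 = true)]
      rw [ih ht]
      simp only [hidx, List.take_succ_cons, List.drop_succ_cons, List.length_cons,
        List.append_assoc, List.cons_append, List.nil_append, Prod.mk.injEq]
      refine ⟨trivial, trivial, ?_⟩
      simp only [decide_eq_decide]
      omega

-- ===== VERDICT (by name: the statement is the Claim_ definition above) =====
theorem separate_text_rules_spec : Claim_equal_separate_text_rules := by
  intro text _
  unfold Spec_separate_text_rules separate_text_rules separate_text_rules_alt
  dsimp only
  rw [foldA_filter]
  rw [foldA_false _ (fun l hl => List.of_mem_filter hl)]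
  simp
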